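-- pv_equiv track=rewrite | github.com/nadong/leetcode | dfs/islands.py | maxIsland
-- ===== SOURCE A (Python) =====
-- def maxIsland(grid) -> (int, int):
--     res = 0
--     cnt = 0
--     for i in range(len(grid)):
--         for j in range(len(grid[i])):
--             if grid[i][j]:
--                 res = max(res, dfs(grid, i, j))
--                 cnt += 1
--     return res, cnt
--
-- def dfs(grid: [[]], x, y) -> int:
--     if x < 0 or x >= len(grid) or y < 0 or y >= len(grid[0]) or grid[x][y] != 1:
--         return 0
--     grid[x][y] = 0
--     return 1 + dfs(grid, x + 1, y) + dfs(grid, x - 1, y) + dfs(grid, x, y - 1) + dfs(grid, x, y + 1)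
-- ===== SOURCE B (Python) =====
-- def maxIsland(grid) -> (int, int):
--     cells = [(i, j) for i in range(len(grid)) for j in range(len(grid[i]))]
--     sizes = []
--     for (i, j) in cells:
--         if grid[i][j]:
--             sizes.append(_fill(grid, i, j))
--     best = 0
--     for s in sizes:
--         if best < s:
--             best = s
--     return best, len(sizes)
--
-- def _fill(grid, i, j):
--     size = 0
--     stack = [(i, j)]
--     while stack:
--         x, y = stack.pop()
--         if 0 <= x < len(grid) and 0 <= y < len(grid[0]) and grid[x][y] == 1:
--             grid[x][y] = 0
--             size += 1
--             stack.extend([(x, y + 1), (x, y - 1), (x - 1, y), (x + 1, y)])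
--     return size
-- ===== Notes on version B (the rewrite author's own statement) =====
-- stated objective: alternative
-- what changed: A's state-carrying nested loop with recursive dfs is replaced by one pass over a precomputed flat list of cell coordinates that collects each island's size (computed by an explicit-stack flood fill) into a list, from which the max and the count are taken at the end.
-- outside the precondition, e.g. on maxIsland([[1, 0], [0, 0], [0]]): A returns (1, 1), B returns (1, 1); on maxIsland([[1, 1], [1]]): A raises IndexError, B raises IndexError
import Mathlib
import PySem

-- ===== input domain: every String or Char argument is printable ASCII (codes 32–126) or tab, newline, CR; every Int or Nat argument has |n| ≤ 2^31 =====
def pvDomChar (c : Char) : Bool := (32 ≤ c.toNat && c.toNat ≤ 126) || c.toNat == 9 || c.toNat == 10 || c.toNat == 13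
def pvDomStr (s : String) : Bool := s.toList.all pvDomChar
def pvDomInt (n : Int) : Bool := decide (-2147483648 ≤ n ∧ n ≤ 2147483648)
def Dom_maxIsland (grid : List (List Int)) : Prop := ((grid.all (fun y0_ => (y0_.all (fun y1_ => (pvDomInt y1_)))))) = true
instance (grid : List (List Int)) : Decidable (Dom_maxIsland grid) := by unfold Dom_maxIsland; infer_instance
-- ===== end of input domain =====

-- B restructures A: one pass over a precomputed flat cell list collecting the island sizes (explicit-stack
-- flood fill instead of A's recursive dfs), then max/len are taken from the size list at the end (alternative
-- decomposition, same cost). Both A and B mutate `grid` in place identically (clearing visited 1-cells to 0);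
-- the ports thread that state and the equivalence proved covers the returned pair.

-- ===== PORT A =====
-- grid[x][y] after the bounds checks (exact there; 0/[] defaults are only reached outside Pre_)
def gridGet (g : List (List Int)) (x y : Int) : Int := (g.getD x.toNat []).getD y.toNat 0
-- grid[x][y] = 0
def gridSet (g : List (List Int)) (x y : Int) : List (List Int) :=
  g.set x.toNat ((g.getD x.toNat []).set y.toNat 0)
-- number of 1-cells: the fuel measure making both ports' loops total (a totality device, not part of either algorithm)
def ones (g : List (List Int)) : Nat := (g.map (fun r => r.count 1)).sum

-- dfs(grid, x, y), fueled; fuel ones g + 1 always suffices (each productive call clears a 1-cell)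
def dfsF : Nat → List (List Int) → Int → Int → Int × List (List Int)
  | 0, g, _, _ => (0, g)
  | f+1, g, x, y =>
    if x < 0 ∨ (g.length : Int) ≤ x ∨ y < 0 ∨ ((g.headD []).length : Int) ≤ y ∨ gridGet g x y ≠ 1 then
      (0, g)
    else
      let p1 := dfsF f (gridSet g x y) (x+1) y
      let p2 := dfsF f p1.2 (x-1) y
      let p3 := dfsF f p2.2 x (y-1)
      let p4 := dfsF f p3.2 x (y+1)
      (1 + p1.1 + p2.1 + p3.1 + p4.1, p4.2)

def maxIsland (grid : List (List Int)) : Int × Int :=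
  let st :=
    (PySem.List.pyRange 0 (grid.length : Int) 1).foldl (fun (st : Int × Int × List (List Int)) i =>
      (PySem.List.pyRange 0 ((st.2.2.getD i.toNat []).length : Int) 1).foldl
        (fun (st : Int × Int × List (List Int)) j =>
          if gridGet st.2.2 i j ≠ 0 then
            let p := dfsF (ones st.2.2 + 1) st.2.2 i j
            (max st.1 p.1, st.2.1 + 1, p.2)
          else st) st)
      ((0, 0, grid) : Int × Int × List (List Int))
  (st.1, st.2.1)

-- ===== PORT B =====
-- the while-loop over the explicit stack (top of stack = head; python's pop()/extend order preserved), fueled;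
-- fuel 5 * ones g + stack.length + 1 always suffices
def fillF : Nat → List (List Int) → List (Int × Int) → Int → Int × List (List Int)
  | _, g, [], size => (size, g)
  | 0, g, _ :: _, size => (size, g)
  | f+1, g, (x, y) :: rest, size =>
    if 0 ≤ x ∧ x < (g.length : Int) ∧ 0 ≤ y ∧ y < ((g.headD []).length : Int) ∧ gridGet g x y = 1 then
      fillF f (gridSet g x y) ((x+1, y) :: (x-1, y) :: (x, y-1) :: (x, y+1) :: rest) (size + 1)
    else
      fillF f g rest size

-- the comprehension: [(i, j) for i in range(len(grid)) for j in range(len(grid[i]))]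
def cellsOf (grid : List (List Int)) : List (Int × Int) :=
  (PySem.List.pyRange 0 (grid.length : Int) 1).flatMap
    (fun i => (PySem.List.pyRange 0 ((grid.getD i.toNat []).length : Int) 1).map (fun j => (i, j)))

def maxIsland_alt (grid : List (List Int)) : Int × Int :=
  let st := (cellsOf grid).foldl
      (fun (st : List Int × List (List Int)) c =>
        if gridGet st.2 c.1 c.2 ≠ 0 then
          let p := fillF (5 * ones st.2 + 2) st.2 [(c.1, c.2)] 0
          (st.1 ++ [p.1], p.2)
        else st) ([], grid)
  (st.1.foldl (fun b s => if b < s then s else b) 0, (st.1.length : Int))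

-- ===== PRECONDITION & SPEC =====
-- Pre_ excludes ragged grids that have a row shorter than the first row AND contain a 1-cell: there the flood
-- fill's column bound len(grid[0]) can let grid[x][y] index past a short row and both A and B raise IndexError
-- (whether they actually do depends on island connectivity, which is not a closed-form shape condition, so the
-- whole shape class is excluded; a grid with no 1-cell never recurses and is kept).
def Pre_maxIsland (grid : List (List Int)) : Prop :=
  (∀ r ∈ grid, (grid.headD []).length ≤ r.length) ∨ (∀ r ∈ grid, ∀ c ∈ r, c ≠ 1)
instance (grid : List (List Int)) : Decidable (Pre_maxIsland grid) := by
  unfold Pre_maxIsland; infer_instance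

def pvWitness_maxIsland : List (List Int) := [[1, 1, 0], [0, 1, 2], [1, 0, 1]]

def Spec_maxIsland (grid : List (List Int)) (out : Int × Int) : Prop := out = maxIsland_alt grid
instance (grid : List (List Int)) (out : Int × Int) : Decidable (Spec_maxIsland grid out) := by
  unfold Spec_maxIsland; infer_instance

-- ===== CLAIM (what is proved, stated in full; the proofs are below) =====
def Claim_equal_maxIsland : Prop :=
  ∀ (grid : List (List Int)), Dom_maxIsland grid → Pre_maxIsland grid →
    Spec_maxIsland grid (maxIsland grid)

-- ===== LEMMAS AND PROOFS =====

-- a cleared cell really was a 1-cell: counting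
theorem count_set_row (r : List Int) : ∀ (j : Nat), r.getD j 0 = 1 →
    (r.set j 0).count 1 + 1 = r.count 1 := by
  induction r with
  | nil => intro j h; simp at h
  | cons a t ih =>
    intro j h
    cases j with
    | zero =>
      simp at h
      subst h
      simp
    | succ j =>
      simp at h
      have := ih j h
      simp [List.count_cons]
      omega

theorem ones_gridSet (g : List (List Int)) (x y : Int) (h : gridGet g x y = 1) :
    ones (gridSet g x y) + 1 = ones g := by
  unfold gridGet at h
  unfold gridSet
  generalize x.toNat = i at *
  generalize y.toNat = j at *
  induction g generalizing i with
  | nil => simp at h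
  | cons r t ih =>
    cases i with
    | zero =>
      simp at h ⊢
      have := count_set_row r j h
      simp [ones]
      omega
    | succ i =>
      simp at h ⊢
      have := ih i h
      simp [ones] at this ⊢
      omega

theorem dfsF_ones_le : ∀ (f : Nat) (g : List (List Int)) (x y : Int),
    ones (dfsF f g x y).2 ≤ ones g := by
  intro f
  induction f with
  | zero => intro g x y; simp [dfsF]
  | succ f ih =>
    intro g x y
    rw [dfsF]
    split
    · simp
    · rename_i hguard
      have h1 : gridGet g x y = 1 := by push Not at hguard; exact hguard.2.2.2.2
      have h0 : ones (gridSet g x y) + 1 = ones g := ones_gridSet g x y h1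
      simp only []
      have a1 := ih (gridSet g x y) (x+1) y
      have a2 := ih (dfsF f (gridSet g x y) (x+1) y).2 (x-1) y
      have a3 := ih (dfsF f (dfsF f (gridSet g x y) (x+1) y).2 (x-1) y).2 x (y-1)
      have a4 := ih (dfsF f (dfsF f (dfsF f (gridSet g x y) (x+1) y).2 (x-1) y).2 x (y-1)).2 x (y+1)
      omega

theorem dfsF_irrel : ∀ (f1 f2 : Nat) (g : List (List Int)) (x y : Int),
    ones g < f1 → ones g < f2 → dfsF f1 g x y = dfsF f2 g x y := by
  intro f1
  induction f1 with
  | zero => intro f2 g x y h1 h2; omega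
  | succ f1 ih =>
    intro f2 g x y h1 h2
    cases f2 with
    | zero => omega
    | succ f2 =>
      rw [dfsF, dfsF]
      split
      · rfl
      · rename_i hguard
        have hg1 : gridGet g x y = 1 := by push Not at hguard; exact hguard.2.2.2.2
        have h0 : ones (gridSet g x y) + 1 = ones g := ones_gridSet g x y hg1
        simp only []
        have e1 : dfsF f1 (gridSet g x y) (x+1) y = dfsF f2 (gridSet g x y) (x+1) y :=
          ih f2 (gridSet g x y) (x+1) y (by omega) (by omega)
        rw [e1]
        have b1 := dfsF_ones_le f2 (gridSet g x y) (x+1) y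
        have e2 : dfsF f1 (dfsF f2 (gridSet g x y) (x+1) y).2 (x-1) y
                = dfsF f2 (dfsF f2 (gridSet g x y) (x+1) y).2 (x-1) y :=
          ih f2 _ (x-1) y (by omega) (by omega)
        rw [e2]
        have b2 := dfsF_ones_le f2 (dfsF f2 (gridSet g x y) (x+1) y).2 (x-1) y
        have e3 : dfsF f1 (dfsF f2 (dfsF f2 (gridSet g x y) (x+1) y).2 (x-1) y).2 x (y-1)
                = dfsF f2 (dfsF f2 (dfsF f2 (gridSet g x y) (x+1) y).2 (x-1) y).2 x (y-1) :=
          ih f2 _ x (y-1) (by omega) (by omega)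
        rw [e3]
        have b3 := dfsF_ones_le f2 (dfsF f2 (dfsF f2 (gridSet g x y) (x+1) y).2 (x-1) y).2 x (y-1)
        have e4 : dfsF f1 (dfsF f2 (dfsF f2 (dfsF f2 (gridSet g x y) (x+1) y).2 (x-1) y).2 x (y-1)).2 x (y+1)
                = dfsF f2 (dfsF f2 (dfsF f2 (dfsF f2 (gridSet g x y) (x+1) y).2 (x-1) y).2 x (y-1)).2 x (y+1) :=
          ih f2 _ x (y+1) (by omega) (by omega)
        rw [e4]

theorem fillF_irrel : ∀ (f1 f2 : Nat) (g : List (List Int)) (s : List (Int × Int)) (size : Int),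
    5 * ones g + s.length < f1 → 5 * ones g + s.length < f2 →
    fillF f1 g s size = fillF f2 g s size := by
  intro f1
  induction f1 with
  | zero => intro f2 g s size h1 h2; omega
  | succ f1 ih =>
    intro f2 g s size h1 h2
    cases s with
    | nil => cases f2 with | zero => omega | succ f2 => rfl
    | cons c rest =>
      obtain ⟨x, y⟩ := c
      cases f2 with
      | zero => omega
      | succ f2 =>
        rw [fillF, fillF]
        split
        · rename_i hguard
          have h0 := ones_gridSet g x y hguard.2.2.2.2
          simp only [List.length_cons] at h1 h2
          exact ih f2 (gridSet g x y) _ (size + 1)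
            (by simp only [List.length_cons]; omega)
            (by simp only [List.length_cons]; omega)
        · simp only [List.length_cons] at h1 h2
          exact ih f2 g rest size (by omega) (by omega)

-- the bridge: one stack entry is processed exactly as one dfs call
theorem bridge : ∀ (n : Nat) (g : List (List Int)), ones g = n →
    ∀ (x y : Int) (s : List (Int × Int)) (size : Int),
    fillF (5 * ones g + ((x, y) :: s).length + 1) g ((x, y) :: s) size
      = fillF (5 * ones (dfsF (ones g + 1) g x y).2 + s.length + 1)
          (dfsF (ones g + 1) g x y).2 s (size + (dfsF (ones g + 1) g x y).1) := by
  intro n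
  induction n using Nat.strong_induction_on with
  | _ n IH =>
    intro g hn x y s size
    by_cases hfg : 0 ≤ x ∧ x < (g.length : Int) ∧ 0 ≤ y ∧
        y < ((g.headD []).length : Int) ∧ gridGet g x y = 1
    · -- the popped cell passes the guard: dfs clears it and recurses, fill clears it and pushes
      have hones : ones (gridSet g x y) + 1 = ones g := ones_gridSet g x y hfg.2.2.2.2
      set g0 := gridSet g x y with hg0
      set q1 := dfsF (ones g) g0 (x+1) y with hq1
      set q2 := dfsF (ones g) q1.2 (x-1) y with hq2
      set q3 := dfsF (ones g) q2.2 x (y-1) with hq3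
      set q4 := dfsF (ones g) q3.2 x (y+1) with hq4
      have b1 : ones q1.2 ≤ ones g0 := by rw [hq1]; exact dfsF_ones_le _ _ _ _
      have b2 : ones q2.2 ≤ ones q1.2 := by rw [hq2]; exact dfsF_ones_le _ _ _ _
      have b3 : ones q3.2 ≤ ones q2.2 := by rw [hq3]; exact dfsF_ones_le _ _ _ _
      have b4 : ones q4.2 ≤ ones q3.2 := by rw [hq4]; exact dfsF_ones_le _ _ _ _
      have hd : dfsF (ones g + 1) g x y = (1 + q1.1 + q2.1 + q3.1 + q4.1, q4.2) := by
        rw [dfsF, if_neg (by omega)]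
      rw [hd]
      simp only [List.length_cons]
      rw [show 5 * ones g + (s.length + 1) + 1 = (5 * ones g + s.length + 1) + 1 from by omega]
      rw [fillF, if_pos hfg, ← hg0]
      have e1 : fillF (5 * ones g + s.length + 1) g0
            ((x+1, y) :: (x-1, y) :: (x, y-1) :: (x, y+1) :: s) (size + 1)
          = fillF (5 * ones g0 + ((x-1, y) :: (x, y-1) :: (x, y+1) :: s).length + 1 + 1) g0
            ((x+1, y) :: (x-1, y) :: (x, y-1) :: (x, y+1) :: s) (size + 1) := by
        apply fillF_irrel <;> simp only [List.length_cons] <;> omega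
      have i1 := IH (ones g0) (by omega) g0 rfl (x+1) y
        ((x-1, y) :: (x, y-1) :: (x, y+1) :: s) (size + 1)
      rw [hones] at i1
      simp only [List.length_cons] at i1
      have i2 := IH (ones q1.2) (by omega) q1.2 rfl (x-1) y ((x, y-1) :: (x, y+1) :: s)
        (size + 1 + q1.1)
      have r2 : dfsF (ones q1.2 + 1) q1.2 (x-1) y = q2 := by
        rw [hq2]; exact dfsF_irrel _ _ _ _ _ (by omega) (by omega)
      rw [r2] at i2
      simp only [List.length_cons] at i2
      have i3 := IH (ones q2.2) (by omega) q2.2 rfl x (y-1) ((x, y+1) :: s)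
        (size + 1 + q1.1 + q2.1)
      have r3 : dfsF (ones q2.2 + 1) q2.2 x (y-1) = q3 := by
        rw [hq3]; exact dfsF_irrel _ _ _ _ _ (by omega) (by omega)
      rw [r3] at i3
      simp only [List.length_cons] at i3
      have i4 := IH (ones q3.2) (by omega) q3.2 rfl x (y+1) s
        (size + 1 + q1.1 + q2.1 + q3.1)
      have r4 : dfsF (ones q3.2 + 1) q3.2 x (y+1) = q4 := by
        rw [hq4]; exact dfsF_irrel _ _ _ _ _ (by omega) (by omega)
      rw [r4] at i4
      simp only [List.length_cons] at i4
      rw [show size + (1 + q1.1 + q2.1 + q3.1 + q4.1)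
            = size + 1 + q1.1 + q2.1 + q3.1 + q4.1 from by ring]
      exact e1.trans (i1.trans (i2.trans (i3.trans i4)))
    · -- the popped cell fails the guard: dfs returns (0, g), fill just discards it
      have hd : dfsF (ones g + 1) g x y = (0, g) := by
        rw [dfsF, if_pos (by omega)]
      rw [hd]
      simp only [List.length_cons]
      rw [show 5 * ones g + (s.length + 1) + 1 = (5 * ones g + s.length + 1) + 1 from by omega]
      rw [fillF, if_neg hfg]
      simp

-- proof-only abbreviations of the two loop bodies and the abstraction between their states
def astep (st : Int × Int × List (List Int)) (c : Int × Int) : Int × Int × List (List Int) :=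
  if gridGet st.2.2 c.1 c.2 ≠ 0 then
    let p := dfsF (ones st.2.2 + 1) st.2.2 c.1 c.2
    (max st.1 p.1, st.2.1 + 1, p.2)
  else st

def bstep (st : List Int × List (List Int)) (c : Int × Int) : List Int × List (List Int) :=
  if gridGet st.2 c.1 c.2 ≠ 0 then
    let p := fillF (5 * ones st.2 + 2) st.2 [(c.1, c.2)] 0
    (st.1 ++ [p.1], p.2)
  else st

def phi (st : List Int × List (List Int)) : Int × Int × List (List Int) :=
  (st.1.foldl max 0, (st.1.length : Int), st.2)

-- one cell: A's body on the abstracted state = abstraction of B's body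
theorem step_commute (st : List Int × List (List Int)) (c : Int × Int) :
    astep (phi st) c = phi (bstep st c) := by
  unfold astep bstep phi
  by_cases h : gridGet st.2 c.1 c.2 ≠ 0
  · rw [if_pos h, if_pos h]
    have hb := bridge (ones st.2) st.2 rfl c.1 c.2 [] 0
    simp only [List.length_cons, List.length_nil] at hb
    set d := dfsF (ones st.2 + 1) st.2 c.1 c.2 with hdd
    have hp : fillF (5 * ones st.2 + 2) st.2 [(c.1, c.2)] 0 = (0 + d.1, d.2) := by
      rw [show 5 * ones st.2 + 2 = 5 * ones st.2 + 0 + 1 + 1 from by omega]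
      exact hb.trans (by rw [fillF])
    simp only [hp, List.foldl_append, List.foldl_cons, List.foldl_nil, List.length_append,
      List.length_cons, List.length_nil]
    refine Prod.ext ?_ (Prod.ext (by push_cast; ring) rfl)
    simp only [zero_add]
  · rw [if_neg h, if_neg h]

theorem foldl_phi (l : List (Int × Int)) : ∀ (st : List Int × List (List Int)),
    l.foldl astep (phi st) = phi (l.foldl bstep st) := by
  induction l with
  | nil => intro st; rfl
  | cons c t ih =>
    intro st
    simp only [List.foldl_cons, step_commute]
    exact ih _

-- shape (row lengths) is invariant under clearing a cell / dfs / astep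
theorem map_length_set_getD (l : List (List Int)) : ∀ (i : Nat),
    (l.map List.length).set i (l.getD i []).length = l.map List.length := by
  induction l with
  | nil => intro i; simp
  | cons r t ih =>
    intro i
    cases i with
    | zero => simp
    | succ i => simp only [List.map_cons, List.getD_cons_succ, List.set_cons_succ, ih i]

theorem gridSet_shape (g : List (List Int)) (x y : Int) :
    (gridSet g x y).map List.length = g.map List.length := by
  unfold gridSet
  rw [List.map_set]
  simp only [List.length_set]
  exact map_length_set_getD g x.toNat

theorem dfsF_shape : ∀ (f : Nat) (g : List (List Int)) (x y : Int),
    (dfsF f g x y).2.map List.length = g.map List.length := by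
  intro f
  induction f with
  | zero => intro g x y; simp [dfsF]
  | succ f ih =>
    intro g x y
    rw [dfsF]
    split
    · rfl
    · simp only []
      rw [ih, ih, ih, ih, gridSet_shape]

theorem astep_shape (st : Int × Int × List (List Int)) (c : Int × Int) :
    (astep st c).2.2.map List.length = st.2.2.map List.length := by
  unfold astep
  split
  · exact dfsF_shape _ _ _ _
  · rfl

theorem foldl_astep_shape (i : Int) (l : List Int) : ∀ (st : Int × Int × List (List Int)),
    (l.foldl (fun st j => astep st (i, j)) st).2.2.map List.length = st.2.2.map List.length := by
  induction l with
  | nil => intro st; rfl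
  | cons j t ih => intro st; rw [List.foldl_cons, ih, astep_shape]

theorem length_getD_of_shape (g h : List (List Int))
    (hs : g.map List.length = h.map List.length) (i : Nat) :
    (g.getD i []).length = (h.getD i []).length := by
  have key : ∀ (l : List (List Int)) (i : Nat), (l.getD i []).length = (l.map List.length).getD i 0 := by
    intro l
    induction l with
    | nil => intro i; simp
    | cons r t ih => intro i; cases i with
      | zero => simp
      | succ i => simpa using ih i
  rw [key, key, hs]

-- A's nested loop (inner bound read from the mutated grid) = flat loop over the precomputed cells
theorem nested_to_flat (grid : List (List Int)) : ∀ (l : List Int)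
    (st : Int × Int × List (List Int)), st.2.2.map List.length = grid.map List.length →
    l.foldl (fun st i =>
        (PySem.List.pyRange 0 ((st.2.2.getD i.toNat []).length : Int) 1).foldl
          (fun st j => astep st (i, j)) st) st
      = (l.flatMap (fun i =>
          (PySem.List.pyRange 0 ((grid.getD i.toNat []).length : Int) 1).map (fun j => (i, j)))).foldl
          astep st := by
  intro l
  induction l with
  | nil => intro st _; rfl
  | cons i t ih =>
    intro st hs
    rw [List.foldl_cons, List.flatMap_cons, List.foldl_append, List.foldl_map]
    rw [length_getD_of_shape st.2.2 grid hs i.toNat]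
    apply ih
    rw [foldl_astep_shape]
    exact hs

-- B's final best-loop is foldl max
theorem best_foldl (l : List Int) : ∀ (b : Int),
    l.foldl (fun b s => if b < s then s else b) b = l.foldl max b := by
  induction l with
  | nil => intro b; rfl
  | cons s t ih =>
    intro b
    simp only [List.foldl_cons, ih]
    congr 1
    rcases lt_or_ge b s with h | h
    · rw [if_pos h, max_eq_right (le_of_lt h)]
    · rw [if_neg (not_lt.mpr h), max_eq_left h]

-- ===== VERDICT (by name: the statement is the Claim_ definition above) =====
theorem maxIsland_spec : Claim_equal_maxIsland := by
  intro grid _ _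
  unfold Spec_maxIsland
  have h1 := nested_to_flat grid (PySem.List.pyRange 0 (grid.length : Int) 1)
    ((0, 0, grid) : Int × Int × List (List Int)) rfl
  have h2 : phi ([], grid) = ((0, 0, grid) : Int × Int × List (List Int)) := by simp [phi]
  have h3 := foldl_phi (cellsOf grid) ([], grid)
  rw [h2] at h3
  calc maxIsland grid
      = (((cellsOf grid).foldl astep (0, 0, grid)).1,
         ((cellsOf grid).foldl astep (0, 0, grid)).2.1) := by
        exact congrArg (fun st => (st.1, st.2.1)) h1
    _ = ((phi ((cellsOf grid).foldl bstep ([], grid))).1,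
         (phi ((cellsOf grid).foldl bstep ([], grid))).2.1) := by rw [h3]
    _ = (((cellsOf grid).foldl bstep ([], grid)).1.foldl max 0,
         ((((cellsOf grid).foldl bstep ([], grid)).1.length : Nat) : Int)) := rfl
    _ = (((cellsOf grid).foldl bstep ([], grid)).1.foldl (fun b s => if b < s then s else b) 0,
         ((((cellsOf grid).foldl bstep ([], grid)).1.length : Nat) : Int)) := by rw [best_foldl]
    _ = maxIsland_alt grid := rfl
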